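-- pv_equiv track=rewrite | github.com/rsadasiv/GreatAdventure | code/md_to_html.py | is_poetry_block
-- ===== SOURCE A (Python) =====
-- def is_poetry_block(lines, idx):
--     # Heuristic: 2+ consecutive short lines (<=60 chars), not headings, not blockquote, not empty
--     count = 0
--     for i in range(idx, len(lines)):
--         l = lines[i].strip()
--         if not l or l.startswith('##') or l.startswith('###') or l.startswith('>'):
--             break
--         if len(l) <= 60:
--             count += 1
--         else:
--             break
--     return count >= 2
-- ===== SOURCE B (Python) =====
-- def is_poetry_block(lines, idx):
--     # Loopless: A's loop breaks at the first invalid line, so the count reaches 2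
--     # exactly when the first two lines from idx are both valid short non-heading lines.
--     def valid(l):
--         return bool(l) and not l.startswith('##') and not l.startswith('>') and len(l) <= 60
--     return idx + 1 < len(lines) and valid(lines[idx].strip()) and valid(lines[idx + 1].strip())
-- ===== Notes on version B (the rewrite author's own statement) =====
-- stated objective: faster
-- what changed: Replaced A's counting loop over the tail of the list with a loopless O(1) check: since A's loop breaks at the first invalid line, count>=2 holds exactly when the first two lines from idx pass a single valid() predicate, so B tests just lines[idx] and lines[idx+1] after a bound check.
import Mathlib
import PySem

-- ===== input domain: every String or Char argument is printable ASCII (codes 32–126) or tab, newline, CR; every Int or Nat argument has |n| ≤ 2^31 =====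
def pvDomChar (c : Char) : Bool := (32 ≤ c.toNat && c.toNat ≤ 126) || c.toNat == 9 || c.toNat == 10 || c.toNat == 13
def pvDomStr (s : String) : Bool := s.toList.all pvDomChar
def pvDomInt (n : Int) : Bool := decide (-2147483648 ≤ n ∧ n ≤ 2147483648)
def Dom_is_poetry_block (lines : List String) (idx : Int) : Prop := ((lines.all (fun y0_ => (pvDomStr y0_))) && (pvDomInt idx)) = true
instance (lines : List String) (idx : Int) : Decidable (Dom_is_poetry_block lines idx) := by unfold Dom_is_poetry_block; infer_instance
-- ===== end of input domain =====

-- B is the loopless form of A's heuristic: A's loop breaks at the first invalid line,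
-- so count>=2 iff the first two lines from idx are valid; B checks exactly those two.

-- ===== PORT A =====
-- the for-loop of A: walks the range indices, keeping `count`; breaks return count
def ipbGo (lines : List String) : List Int → Int → Int
  | [], count => count
  | i :: rest, count =>
    match PySem.List.pyGet? lines i with
    | none => count   -- IndexError in Python; excluded by Pre_
    | some s =>
      let l := PySem.Str.strip s
      if l = "" || PySem.Str.startswith l "##" || PySem.Str.startswith l "###" || PySem.Str.startswith l ">" then
        count
      else if PySem.Str.len l ≤ 60 then
        ipbGo lines rest (count + 1)
      else
        count

def is_poetry_block (lines : List String) (idx : Int) : Bool :=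
  decide (2 ≤ ipbGo lines (PySem.List.pyRange idx (PySem.List.len lines) 1) 0)

-- ===== PORT B =====
def ipbValid (l : String) : Bool :=
  !(l == "") && !PySem.Str.startswith l "##" && !PySem.Str.startswith l ">" &&
    decide (PySem.Str.len l ≤ 60)

def ipbAt (lines : List String) (i : Int) : Bool :=
  match PySem.List.pyGet? lines i with
  | none => false      -- IndexError in Python; excluded by Pre_
  | some s => ipbValid (PySem.Str.strip s)

def is_poetry_block_alt (lines : List String) (idx : Int) : Bool :=
  decide (idx + 1 < PySem.List.len lines) && ipbAt lines idx && ipbAt lines (idx + 1)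

-- ===== PRECONDITION & SPEC =====
-- Pre_ excludes exactly the inputs where A raises IndexError: idx < -len(lines).
def Pre_is_poetry_block (lines : List String) (idx : Int) : Prop :=
  -(lines.length : Int) ≤ idx
instance (lines : List String) (idx : Int) : Decidable (Pre_is_poetry_block lines idx) := by
  unfold Pre_is_poetry_block; infer_instance

def pvWitness_is_poetry_block : List String × Int := (["a line", "another line"], 0)

def Spec_is_poetry_block (lines : List String) (idx : Int) (out : Bool) : Prop := out = is_poetry_block_alt lines idx
instance (lines : List String) (idx : Int) (out : Bool) : Decidable (Spec_is_poetry_block lines idx out) := by unfold Spec_is_poetry_block; infer_instance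

-- ===== CLAIM (what is proved, stated in full; the proofs are below) =====
def Claim_equal_is_poetry_block : Prop := ∀ (lines : List String) (idx : Int), Dom_is_poetry_block lines idx → Pre_is_poetry_block lines idx → Spec_is_poetry_block lines idx (is_poetry_block lines idx)


-- ===== LEMMAS AND PROOFS =====

-- the loop only ever increases count
theorem ipbGo_ge (lines : List String) (r : List Int) (c : Int) : c ≤ ipbGo lines r c := by
  induction r generalizing c with
  | nil => simp [ipbGo]
  | cons i rest ih =>
    unfold ipbGo
    cases PySem.List.pyGet? lines i with
    | none => simp
    | some s =>
      simp only
      split_ifs with h1 h2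
      · exact le_refl c
      · exact le_trans (by omega) (ih (c + 1))
      · exact le_refl c

-- a line starting with '###' starts with '##'
theorem startswith_hhh (l : String) (h : PySem.Chars.startswith l.toList ['#', '#'] = false) :
    PySem.Chars.startswith l.toList ['#', '#', '#'] = false := by
  by_contra hc
  rw [Bool.not_eq_false, PySem.Chars.startswith_iff] at hc
  have h2 : ['#', '#'] <+: l.toList := List.IsPrefix.trans ⟨['#'], by decide⟩ hc
  rw [← PySem.Chars.startswith_iff] at h2
  rw [h2] at h
  exact Bool.noConfusion h

-- B's valid predicate is the negation of A's break test conjoined with the length test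
theorem valid_iff (l : String) :
    ipbValid l = ((!(decide (l = "") || PySem.Str.startswith l "##" || PySem.Str.startswith l "###" || PySem.Str.startswith l ">")) && decide (PySem.Str.len l ≤ 60)) := by
  simp only [ipbValid, PySem.Str.startswith_eq, PySem.Str.len_eq]
  cases hA : PySem.Chars.startswith l.toList "##".toList
  · have h3 := startswith_hhh l (by simpa using hA)
    cases he : l == "" <;> simp_all
  · simp_all

-- ===== VERDICT (by name: the statement is the Claim_ definition above) =====
theorem is_poetry_block_spec : Claim_equal_is_poetry_block := by
  intro lines idx _hdom hpre
  unfold Spec_is_poetry_block is_poetry_block is_poetry_block_alt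
  unfold Pre_is_poetry_block at hpre
  simp only [PySem.List.len_eq]
  rw [Bool.eq_iff_iff]
  simp only [Bool.and_eq_true, decide_eq_true_eq]
  by_cases hb : idx + 1 < (lines.length : Int)
  · -- both lines[idx] and lines[idx+1] exist
    obtain ⟨s0, hs0⟩ : ∃ s, PySem.List.pyGet? lines idx = some s := by
      cases hx : PySem.List.pyGet? lines idx with
      | none =>
        rw [PySem.List.pyGet?_eq_none_iff] at hx
        exact absurd (by simp [PySem.Raise.InRange]; omega) hx
      | some s => exact ⟨s, rfl⟩
    obtain ⟨s1, hs1⟩ : ∃ s, PySem.List.pyGet? lines (idx + 1) = some s := by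
      cases hx : PySem.List.pyGet? lines (idx + 1) with
      | none =>
        rw [PySem.List.pyGet?_eq_none_iff] at hx
        exact absurd (by simp [PySem.Raise.InRange]; omega) hx
      | some s => exact ⟨s, rfl⟩
    simp only [PySem.List.pyRange_one_cons (show idx < (lines.length : Int) by omega),
      PySem.List.pyRange_one_cons (show idx + 1 < (lines.length : Int) by omega)]
    unfold ipbGo
    unfold ipbAt
    simp only [hs0, hs1]
    split_ifs with hbrk0 hlen0
    · -- break at the first line: A gives 0, B's first valid is false
      rw [valid_iff (PySem.Str.strip s0), hbrk0]
      simp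
    · -- first line valid: look at the second line
      unfold ipbGo
      simp only [hs1]
      rw [Bool.not_eq_true] at hbrk0
      split_ifs with hbrk1 hlen1
      · rw [valid_iff (PySem.Str.strip s1), hbrk1]
        simp
      · -- both lines valid: count reaches 2 and only grows
        rw [Bool.not_eq_true] at hbrk1
        refine iff_of_true ?_ ⟨⟨hb, ?_⟩, ?_⟩
        · have hge := ipbGo_ge lines (PySem.List.pyRange (idx + 1 + 1) lines.length 1) (0 + 1 + 1)
          omega
        · rw [valid_iff (PySem.Str.strip s0), hbrk0]
          simp only [Bool.not_false, Bool.true_and, decide_eq_true_eq]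
          exact hlen0
        · rw [valid_iff (PySem.Str.strip s1), hbrk1]
          simp only [Bool.not_false, Bool.true_and, decide_eq_true_eq]
          exact hlen1
      · -- second line too long: A gives 1, B's second valid is false
        refine iff_of_false (by omega) ?_
        rintro ⟨-, hv1⟩
        rw [valid_iff (PySem.Str.strip s1), Bool.and_eq_true, decide_eq_true_eq] at hv1
        exact hlen1 hv1.2
    · -- first line too long: A gives 0, B's first valid is false
      refine iff_of_false (by omega) ?_
      rintro ⟨⟨-, hv0⟩, -⟩
      rw [valid_iff (PySem.Str.strip s0), Bool.and_eq_true, decide_eq_true_eq] at hv0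
      exact hlen0 hv0.2
  · -- at most one line in range: count ≤ 1, B's bound check fails
    refine iff_of_false ?_ (fun h => hb h.1.1)
    by_cases hi : idx < (lines.length : Int)
    · simp only [PySem.List.pyRange_one_cons hi,
        PySem.List.pyRange_one_eq_nil (show (lines.length : Int) ≤ idx + 1 by omega)]
      cases hx : PySem.List.pyGet? lines idx with
      | none =>
        simp only [ipbGo, hx]
        omega
      | some s =>
        simp only [ipbGo, hx]
        split_ifs <;> omega
    · simp only [PySem.List.pyRange_one_eq_nil (show (lines.length : Int) ≤ idx by omega)]
      simp only [ipbGo]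
      omega
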